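-- pv_equiv track=rewrite | github.com/Phumsirii/Computer-Programming-2022-2 | [09_MoreDC_34] 09_NestedList_★★★_Fill_In_Numbers.py | pattern5
-- ===== SOURCE A (Python) =====
-- def pattern5(n):
--     a=[]
--     for i in range(n):
--         a.append([0]*i)
--     i=1
--     o=True
--     while o:
--         o=False
--         for e in a:
--             if len(e)<n:
--                 e.append(i)
--                 i+=1
--                 o=True
--     return a
-- ===== SOURCE B (Python) =====
-- def pattern5(n):
--     # Closed form: the cell appended in diagonal pass d to row r is
--     # 1 + (n + (n-1) + ... + (n-d+1)) + r = d*(2*n - d + 1)//2 + r + 1,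
--     # so each row is computed independently without any running counter.
--     return [[0] * r + [d * (2 * n - d + 1) // 2 + r + 1 for d in range(n - r)]
--             for r in range(n)]
-- ===== Notes on version B (the rewrite author's own statement) =====
-- stated objective: alternative
-- what changed: Replaces A's stateful algorithm (a running counter threaded through repeated whole-list sweeps under a did-anything-change flag) by a stateless closed form: each cell is computed directly as d*(2*n-d+1)//2 + r + 1, the triangular-number index of diagonal pass d at row r, so every row is built independently by a comprehension.
import Mathlib
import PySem

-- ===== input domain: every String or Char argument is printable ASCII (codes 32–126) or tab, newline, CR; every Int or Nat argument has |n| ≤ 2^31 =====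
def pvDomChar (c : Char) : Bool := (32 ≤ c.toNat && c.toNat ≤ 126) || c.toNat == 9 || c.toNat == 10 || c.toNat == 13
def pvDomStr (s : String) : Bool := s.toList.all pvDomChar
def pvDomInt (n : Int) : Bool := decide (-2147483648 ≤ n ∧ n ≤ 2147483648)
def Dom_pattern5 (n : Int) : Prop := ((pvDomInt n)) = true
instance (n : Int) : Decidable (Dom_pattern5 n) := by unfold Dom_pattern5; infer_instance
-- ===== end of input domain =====

-- B replaces A's stateful repeated sweeps (a counter threaded through whole-list passes under a
-- did-anything-change flag) by a stateless closed form computing each row independently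
-- (objective: simpler); same return value for every int n.

-- ===== PORT A =====
-- one 'for e in a' pass of A's while-loop body: appends the counter to every row shorter than n
def pattern5_passA (n : Int) : List (List Int) → Int → List (List Int) × Int × Bool
  | [], i => ([], i, false)
  | e :: rest, i =>
    if ((e.length : Int)) < n then
      let r := pattern5_passA n rest (i + 1)
      ((e ++ [i]) :: r.1, r.2.1, true)
    else
      let r := pattern5_passA n rest i
      (e :: r.1, r.2.1, r.2.2)

-- termination measure for A's while-loop (number of cells still missing)
def pvMeasureA (n : Int) (a : List (List Int)) : Nat :=
  (a.map (fun e => (n - (e.length : Int)).toNat)).sum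

-- cited by 'decreasing_by' of pattern5_whileA
theorem pattern5_passA_measure (n : Int) (a : List (List Int)) (i : Int) :
    pvMeasureA n (pattern5_passA n a i).1 ≤ pvMeasureA n a ∧
    ((pattern5_passA n a i).2.2 = true →
      pvMeasureA n (pattern5_passA n a i).1 < pvMeasureA n a) := by
  induction a generalizing i with
  | nil => simp [pattern5_passA]
  | cons e rest ih =>
    by_cases h : ((e.length : Int)) < n
    · have h1 : (n - ((e ++ [i]).length : Int)).toNat < (n - (e.length : Int)).toNat := by
        simp only [List.length_append, List.length_cons, List.length_nil]
        omega
      have := ih (i + 1)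
      constructor
      · simp only [pattern5_passA, if_pos h, pvMeasureA, List.map_cons, List.sum_cons] at *
        omega
      · intro _
        simp only [pattern5_passA, if_pos h, pvMeasureA, List.map_cons, List.sum_cons] at *
        omega
    · have := ih i
      constructor
      · simp only [pattern5_passA, if_neg h, pvMeasureA, List.map_cons, List.sum_cons] at *
        omega
      · intro ho
        simp only [pattern5_passA, if_neg h] at ho
        have := (ih i).2 ho
        simp only [pattern5_passA, if_neg h, pvMeasureA, List.map_cons, List.sum_cons] at *
        omega

-- A's 'while o:' loop
def pattern5_whileA (n : Int) (a : List (List Int)) (i : Int) : List (List Int) :=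
  if h : (pattern5_passA n a i).2.2 = true then
    pattern5_whileA n (pattern5_passA n a i).1 (pattern5_passA n a i).2.1
  else (pattern5_passA n a i).1
termination_by pvMeasureA n a
decreasing_by exact (pattern5_passA_measure n a i).2 h

def pattern5 (n : Int) : List (List Int) :=
  let a := (PySem.List.pyRange 0 n 1).foldl
    (fun a i => a ++ [PySem.List.pyRepeat [(0 : Int)] i]) []
  pattern5_whileA n a 1

-- ===== PORT B =====
-- closed form per cell: value appended in pass d to row r is d*(2n-d+1)//2 + r + 1
def pattern5_alt (n : Int) : List (List Int) :=
  (PySem.List.pyRange 0 n 1).map (fun r =>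
    PySem.List.pyRepeat [(0 : Int)] r ++
      (PySem.List.pyRange 0 (n - r) 1).map
        (fun d => PySem.Int.floordiv (d * (2 * n - d + 1)) 2 + r + 1))

-- ===== PRECONDITION & SPEC =====
def Spec_pattern5 (n : Int) (out : List (List Int)) : Prop := out = pattern5_alt n
instance (n : Int) (out : List (List Int)) : Decidable (Spec_pattern5 n out) := by unfold Spec_pattern5; infer_instance

-- ===== CLAIM =====
def Claim_equal_pattern5 : Prop := ∀ (n : Int), Dom_pattern5 n → Spec_pattern5 n (pattern5 n)

-- ===== LEMMAS AND PROOFS =====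

-- the counter's value at the start of pass d
def pvCnt (n : Int) (d : ℕ) : Int :=
  PySem.Int.floordiv ((d : Int) * (2 * n - d + 1)) 2 + 1

theorem pvCnt_step (n : Int) (d : ℕ) : pvCnt n (d + 1) = pvCnt n d + (n - d) := by
  unfold pvCnt
  rw [PySem.Int.floordiv_eq_ediv_of_pos (by norm_num),
     PySem.Int.floordiv_eq_ediv_of_pos (by norm_num)]
  have h : ((d + 1 : ℕ) : Int) * (2 * n - ((d + 1 : ℕ) : Int) + 1)
      = (d : Int) * (2 * n - d + 1) + (n - d) * 2 := by push_cast; ring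
  rw [h, Int.add_mul_ediv_right _ _ (by norm_num)]
  ring

-- the intended final row r
def pvRow (n : Int) (d r : ℕ) : List Int :=
  List.replicate r (0 : Int) ++
    (List.range (min d (n.toNat - r))).map (fun k => pvCnt n k + r)

-- appending consecutive counter values c, c+1, … to each row in turn
def pvAppendSeq : List (List Int) → Int → List (List Int)
  | [], _ => []
  | e :: rest, c => (e ++ [c]) :: pvAppendSeq rest (c + 1)

theorem pvAppendSeq_length (xs : List (List Int)) (c : Int) :
    (pvAppendSeq xs c).length = xs.length := by
  induction xs generalizing c with
  | nil => rfl
  | cons e rest ih => simp [pvAppendSeq, ih]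

theorem pvAppendSeq_getElem (xs : List (List Int)) (c : Int) (j : ℕ) (h : j < xs.length) :
    (pvAppendSeq xs c)[j]'(by rw [pvAppendSeq_length]; exact h) = xs[j] ++ [c + j] := by
  induction xs generalizing c j with
  | nil => simp at h
  | cons e rest ih =>
    cases j with
    | zero => simp [pvAppendSeq]
    | succ j =>
      simp only [pvAppendSeq, List.getElem_cons_succ]
      rw [ih _ _ (by simp at h; omega)]
      push_cast
      rw [show c + 1 + (j : Int) = c + ((j : Int) + 1) from by ring]

theorem pattern5_passA_ge (n : Int) (ys : List (List Int)) (i : Int)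
    (hy : ∀ e ∈ ys, n ≤ (e.length : Int)) :
    pattern5_passA n ys i = (ys, i, false) := by
  induction ys generalizing i with
  | nil => rfl
  | cons e rest ih =>
    have he := hy e (by simp)
    rw [pattern5_passA, if_neg (by omega), ih i (fun e h => hy e (by simp [h]))]

theorem pattern5_passA_split (n : Int) (xs ys : List (List Int)) (i : Int)
    (hx : ∀ e ∈ xs, (e.length : Int) < n) (hy : ∀ e ∈ ys, n ≤ (e.length : Int)) :
    pattern5_passA n (xs ++ ys) i =
      (pvAppendSeq xs i ++ ys, i + xs.length, !xs.isEmpty) := by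
  induction xs generalizing i with
  | nil => simpa [pvAppendSeq] using pattern5_passA_ge n ys i hy
  | cons e rest ih =>
    have he := hx e (by simp)
    rw [List.cons_append, pattern5_passA, if_pos he,
      ih (i + 1) (fun e h => hx e (by simp [h]))]
    simp only [pvAppendSeq, List.cons_append, List.length_cons, List.isEmpty_cons,
      Prod.mk.injEq]
    and_intros <;> first
      | rfl
      | (push_cast; ring)
      | trivial

-- length of the intended row after d passes
theorem pvRow_length (n : Int) (d r : ℕ) :
    ((pvRow n d r).length : Int) = r + min d (n.toNat - r) := by
  unfold pvRow
  rw [List.length_append, List.length_replicate, List.length_map, List.length_range]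
  push_cast
  omega

-- A's while-loop, started at the beginning of pass d, finishes every row
theorem pv_main (n : Int) (hn : 0 ≤ n) :
    ∀ (m d : ℕ), d + m = n.toNat →
    ∀ (a : List (List Int)), a.length = n.toNat →
    (∀ r (h : r < a.length), a[r] = pvRow n d r) →
    pattern5_whileA n a (pvCnt n d) =
      (List.range n.toNat).map (fun r => pvRow n n.toNat r) := by
  intro m
  induction m with
  | zero =>
    intro d hd a hlen hrows
    have hdn : d = n.toNat := by omega
    subst hdn
    have hge : ∀ e ∈ a, n ≤ (e.length : Int) := by
      intro e he
      obtain ⟨r, hr, rfl⟩ := List.getElem_of_mem he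
      rw [hrows r hr, pvRow_length n _ _]
      omega
    rw [pattern5_whileA, pattern5_passA_ge n a (pvCnt n n.toNat) hge]
    simp only [Bool.false_eq_true, dite_false]
    apply List.ext_getElem (by simp [hlen])
    intro r h1 h2
    simp only [List.getElem_map, List.getElem_range]
    exact hrows r h1
  | succ m ih =>
    intro d hd a hlen hrows
    set k : ℕ := n.toNat - d with hk
    have hk1 : 1 ≤ k := by omega
    have hkle : k ≤ a.length := by omega
    have hxsl : (a.take k).length = k := by simp [hkle]
    have hrowlen : ∀ r (h : r < a.length), ((a[r].length : Int)) = r + min d (n.toNat - r) := by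
      intro r hr
      rw [hrows r hr]
      exact pvRow_length n d r
    have hx : ∀ e ∈ a.take k, (e.length : Int) < n := by
      intro e he
      obtain ⟨r, hr, rfl⟩ := List.getElem_of_mem he
      rw [hxsl] at hr
      rw [List.getElem_take]
      rw [hrowlen r (by omega)]
      omega
    have hy : ∀ e ∈ a.drop k, n ≤ (e.length : Int) := by
      intro e he
      obtain ⟨j, hj, rfl⟩ := List.getElem_of_mem he
      rw [List.getElem_drop]
      have hlt : k + j < a.length := by
        have := hj; simp [List.length_drop] at this; omega
      rw [hrowlen (k + j) hlt]
      omega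
    have hsplit := pattern5_passA_split n (a.take k) (a.drop k) (pvCnt n d) hx hy
    rw [List.take_append_drop] at hsplit
    have htk : a.take k ≠ [] := by
      intro h0; rw [h0] at hxsl; simp at hxsl; omega
    have hne' : (!(a.take k).isEmpty) = true := by simp [htk]
    rw [pattern5_whileA, hsplit, dif_pos hne']
    have hcnt : pvCnt n d + ((a.take k).length : Int) = pvCnt n (d + 1) := by
      rw [pvCnt_step, hxsl]; omega
    rw [hcnt]
    have hlen' : (pvAppendSeq (a.take k) (pvCnt n d) ++ a.drop k).length = n.toNat := by
      simp [pvAppendSeq_length, hkle]; omega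
    apply ih (d + 1) (by omega) _ hlen'
    intro r hr
    rw [hlen'] at hr
    by_cases hrk : r < k
    · rw [List.getElem_append_left (by rw [pvAppendSeq_length, hxsl]; exact hrk),
        pvAppendSeq_getElem _ _ _ (by rw [hxsl]; exact hrk)]
      rw [List.getElem_take, hrows r (by omega)]
      unfold pvRow
      rw [List.append_assoc]
      congr 1
      have hmin1 : min d (n.toNat - r) = d := by omega
      have hmin2 : min (d + 1) (n.toNat - r) = d + 1 := by omega
      rw [hmin1, hmin2, List.range_succ, List.map_append]
      simp
    · rw [List.getElem_append_right (by rw [pvAppendSeq_length, hxsl]; omega)]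
      rw [List.getElem_drop]
      simp only [pvAppendSeq_length, hxsl]
      have hlt : k + (r - k) < a.length := by omega
      rw [hrows (k + (r - k)) hlt]
      have h2 : k + (r - k) = r := by omega
      rw [h2]
      unfold pvRow
      have : min d (n.toNat - r) = min (d + 1) (n.toNat - r) := by omega
      rw [this]

-- building the initial list by repeated append equals map
theorem pv_foldl_append_map (l : List Int) (acc : List (List Int)) :
    l.foldl (fun a i => a ++ [PySem.List.pyRepeat [(0 : Int)] i]) acc =
      acc ++ l.map (fun r => PySem.List.pyRepeat [(0 : Int)] r) := by
  induction l generalizing acc with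
  | nil => simp
  | cons x xs ih =>
    rw [List.foldl_cons, ih]
    simp

-- B's closed form, indexed: row r of pattern5_alt is pvRow at d = n.toNat
theorem pattern5_alt_eq (n : Int) :
    pattern5_alt n = (List.range n.toNat).map (fun r => pvRow n n.toNat r) := by
  unfold pattern5_alt
  apply List.ext_getElem (by simp [PySem.List.length_pyRange_one])
  intro r h1 h2
  have hr : r < n.toNat := by simpa using h2
  simp only [List.getElem_map, List.getElem_range]
  rw [PySem.List.getElem_pyRange_one]
  unfold pvRow
  congr 1
  · rw [PySem.List.pyRepeat_singleton]
    simp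
  · apply List.ext_getElem
    · simp [PySem.List.length_pyRange_one]
    · intro k hk1 hk2
      simp only [List.getElem_map, List.getElem_range]
      rw [PySem.List.getElem_pyRange_one]
      unfold pvCnt
      rw [zero_add, zero_add]
      ring_nf

-- ===== VERDICT =====
theorem pattern5_spec : Claim_equal_pattern5 := by
  intro n _
  unfold Spec_pattern5 pattern5
  rw [pv_foldl_append_map]
  simp only [List.nil_append]
  by_cases hn : 0 ≤ n
  · set a0 := (PySem.List.pyRange 0 n 1).map (fun r => PySem.List.pyRepeat [(0 : Int)] r)
      with ha0
    have hlen : a0.length = n.toNat := by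
      simp [ha0, PySem.List.length_pyRange_one]
    have hone : (1 : Int) = pvCnt n 0 := by
      unfold pvCnt
      norm_num [PySem.Int.floordiv]
    have hrows : ∀ r (h : r < a0.length), a0[r] = pvRow n 0 r := by
      intro r hr
      have hr' : r < (PySem.List.pyRange 0 n 1).length := by simpa [ha0] using hr
      simp only [ha0, List.getElem_map]
      rw [PySem.List.getElem_pyRange_one, PySem.List.pyRepeat_singleton]
      simp [pvRow]
    rw [hone, pv_main n hn n.toNat 0 (by omega) a0 hlen hrows, pattern5_alt_eq n]
  · rw [not_le] at hn
    have hempty : PySem.List.pyRange 0 n 1 = [] :=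
      PySem.List.pyRange_one_eq_nil (by omega)
    rw [hempty]
    simp only [List.map_nil]
    rw [pattern5_whileA]
    simp only [pattern5_passA]
    simp [pattern5_alt, hempty]
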